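-- pv_equiv track=rewrite | github.com/jomag/advent-of-code | 2025/day1/day1.py | part1
-- ===== SOURCE A (Python) =====
-- def part1(data, verbose=False):
--     pos = 50
--     pw = 0
--     for (d, n) in data:
--         if d == "L":
--             pos = (pos - n) % 100
--         elif d == "R":
--             pos = (pos + n) % 100
--         if pos == 0:
--             pw += 1
--     return pw
-- ===== SOURCE B (Python) =====
-- # B: transform-accumulate-filter pipeline: map moves to signed deltas, build
-- # running prefix sums, then count positions where (50 + prefix) % 100 == 0.
-- def part1(data, verbose=False):
--     deltas = [-n if d == "L" else n if d == "R" else 0 for (d, n) in data]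
--     prefix = []
--     s = 0
--     for x in deltas:
--         s += x
--         prefix.append(s)
--     return sum(1 for s in prefix if (50 + s) % 100 == 0)
-- ===== Notes on version B (the rewrite author's own statement) =====
-- stated objective: alternative
-- what changed: Replaces the fused stateful modular loop with a transform-accumulate-filter pipeline: moves are mapped to signed deltas, prefix sums are accumulated without any modular reduction, and the answer is the count of prefixes with (50+s) % 100 == 0.
import Mathlib
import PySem

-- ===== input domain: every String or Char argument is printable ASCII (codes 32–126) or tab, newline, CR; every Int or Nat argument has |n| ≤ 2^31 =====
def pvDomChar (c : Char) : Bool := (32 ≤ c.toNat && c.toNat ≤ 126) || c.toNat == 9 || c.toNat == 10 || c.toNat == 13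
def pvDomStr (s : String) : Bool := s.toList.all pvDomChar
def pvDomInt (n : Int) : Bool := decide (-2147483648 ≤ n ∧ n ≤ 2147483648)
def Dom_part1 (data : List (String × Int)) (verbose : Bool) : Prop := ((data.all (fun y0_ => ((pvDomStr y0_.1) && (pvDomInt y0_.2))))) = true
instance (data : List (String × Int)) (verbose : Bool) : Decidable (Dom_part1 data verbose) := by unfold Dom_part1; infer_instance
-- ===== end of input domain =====

-- B replaces A's fused stateful modular loop with a map-to-deltas / prefix-sum / count pipeline; same O(n) cost.


-- ===== PORT A =====
-- the body of A's for-loop over the state (pos, pw)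
def stepA (st : Int × Int) (dn : String × Int) : Int × Int :=
  let pos :=
    if dn.1 == "L" then PySem.Int.mod (st.1 - dn.2) 100
    else if dn.1 == "R" then PySem.Int.mod (st.1 + dn.2) 100
    else st.1
  (pos, if pos == 0 then st.2 + 1 else st.2)

def part1 (data : List (String × Int)) (verbose : Bool) : Int :=
  (data.foldl stepA (50, 0)).2

-- ===== PORT B =====
-- '-n if d == "L" else n if d == "R" else 0'
def deltaB (p : String × Int) : Int :=
  if p.1 == "L" then -p.2 else if p.1 == "R" then p.2 else 0

def part1_alt (data : List (String × Int)) (verbose : Bool) : Int :=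
  let deltas := data.map deltaB
  let prefs := (deltas.foldl (fun (st : Int × List Int) x => (st.1 + x, st.2 ++ [st.1 + x])) (0, [])).2
  ((prefs.countP (fun s => PySem.Int.mod (50 + s) 100 == 0) : Nat) : Int)

-- ===== PRECONDITION & SPEC =====
def Spec_part1 (data : List (String × Int)) (verbose : Bool) (out : Int) : Prop := out = part1_alt data verbose
instance (data : List (String × Int)) (verbose : Bool) (out : Int) : Decidable (Spec_part1 data verbose out) := by unfold Spec_part1; infer_instance

-- ===== CLAIM (what is proved, stated in full; the proofs are below) =====
def Claim_equal_part1 : Prop := ∀ (data : List (String × Int)) (verbose : Bool), Dom_part1 data verbose → Spec_part1 data verbose (part1 data verbose)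

-- ===== LEMMAS AND PROOFS =====

-- pure prefix-sum list starting from running sum s
def scanB (s : Int) : List Int → List Int
  | [] => []
  | x :: xs => (s + x) :: scanB (s + x) xs

theorem prefs_fold (xs : List Int) (s : Int) (acc : List Int) :
    (xs.foldl (fun (st : Int × List Int) x => (st.1 + x, st.2 ++ [st.1 + x])) (s, acc)).2
      = acc ++ scanB s xs := by
  induction xs generalizing s acc with
  | nil => simp [scanB]
  | cons x xs ih => simp [List.foldl, scanB, ih]

theorem mod_shift (a b : Int) :
    PySem.Int.mod (PySem.Int.mod a 100 + b) 100 = PySem.Int.mod (a + b) 100 := by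
  rw [PySem.Int.mod_eq_emod_of_pos (by norm_num), PySem.Int.mod_eq_emod_of_pos (by norm_num),
      PySem.Int.mod_eq_emod_of_pos (by norm_num), Int.add_emod, Int.emod_emod_of_dvd _ (by norm_num),
      ← Int.add_emod]

theorem stepA_eq (s pw : Int) (d : String) (n : Int) :
    stepA (PySem.Int.mod (50 + s) 100, pw) (d, n)
      = (PySem.Int.mod (50 + (s + deltaB (d, n))) 100,
         if (PySem.Int.mod (50 + (s + deltaB (d, n))) 100 == 0) = true then pw + 1 else pw) := by
  unfold stepA deltaB
  by_cases hL : (d == "L") = true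
  · simp only [hL, if_true]
    rw [sub_eq_add_neg, mod_shift]
    ring_nf
  · by_cases hR : (d == "R") = true
    · simp only [hL, hR, if_true, if_false, Bool.false_eq_true]
      rw [mod_shift]
      ring_nf
    · simp only [hL, hR, if_false, Bool.false_eq_true]
      ring_nf

theorem main_inv (data : List (String × Int)) (s pw : Int) :
    (data.foldl stepA (PySem.Int.mod (50 + s) 100, pw)).2
    = pw + (((scanB s (data.map deltaB)).countP (fun t => PySem.Int.mod (50 + t) 100 == 0) : Nat) : Int) := by
  induction data generalizing s pw with
  | nil => simp [scanB]
  | cons hd tl ih =>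
    obtain ⟨d, n⟩ := hd
    simp only [List.foldl, List.map, scanB, List.countP_cons]
    rw [stepA_eq, ih]
    simp only [Nat.cast_add]
    split_ifs with h1 h2 h2 <;> push_cast <;> simp_all <;> ring

-- ===== VERDICT (by name: the statement is the Claim_ definition above) =====
theorem part1_spec : Claim_equal_part1 := by
  intro data verbose _
  show part1 data verbose = part1_alt data verbose
  have h := main_inv data 0 0
  have h50 : PySem.Int.mod (50 + 0) 100 = 50 := by decide
  rw [h50] at h
  simp only [part1, part1_alt, prefs_fold, List.nil_append]
  rw [h]
  ring
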